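-- pv_equiv track=rewrite | github.com/mlsample/ipy_oxDNA | scr/.ipynb_checkpoints/umbrella_sampling-checkpoint.py | get_windows_per_gpu
-- ===== SOURCE A (Python) =====
-- def get_windows_per_gpu(n_gpus, n_confs):
--     """
--     Calculate the optimal number of windows per gpu
--     :param n_gpus:
--     :return:
--     """
--     round = n_confs // n_gpus
--     remainder = n_confs % n_gpus
--     w_p_gpu = []
--     for i in range(n_gpus):
--         if remainder != 0:
--             w_p_gpu.append(round + 1)
--             remainder -= 1
--         else:
--             w_p_gpu.append(round)
--     w_p_gpu.sort()
--     return w_p_gpu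
-- ===== SOURCE B (Python) =====
-- def get_windows_per_gpu(n_gpus, n_confs):
--     # GPU i gets (n_confs + i) // n_gpus windows: a per-index closed form of the
--     # fair division, which is ascending by construction (no counter, no sort).
--     return [(n_confs + i) // n_gpus for i in range(n_gpus)]
-- ===== Notes on version B (the rewrite author's own statement) =====
-- stated objective: simpler
-- what changed: Replaced the remainder-decrementing loop plus final .sort() with a per-index closed form: GPU i gets (n_confs + i) // n_gpus, which is ascending by construction.
import Mathlib
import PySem

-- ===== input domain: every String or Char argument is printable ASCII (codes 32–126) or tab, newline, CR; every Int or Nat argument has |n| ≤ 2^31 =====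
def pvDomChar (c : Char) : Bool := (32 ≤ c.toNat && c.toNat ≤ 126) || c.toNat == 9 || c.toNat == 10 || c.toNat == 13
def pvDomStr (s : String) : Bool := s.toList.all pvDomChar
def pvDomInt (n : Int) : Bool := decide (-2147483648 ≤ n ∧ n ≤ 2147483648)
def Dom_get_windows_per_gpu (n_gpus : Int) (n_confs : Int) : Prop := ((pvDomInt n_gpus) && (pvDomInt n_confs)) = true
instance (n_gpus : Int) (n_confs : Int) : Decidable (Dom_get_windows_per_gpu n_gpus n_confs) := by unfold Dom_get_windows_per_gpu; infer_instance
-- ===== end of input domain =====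

-- B replaces A's remainder-counting loop plus .sort() with a per-index closed form
-- (GPU i gets (n_confs + i) // n_gpus, ascending by construction); objective: simpler.

-- ===== PORT A =====
-- literal transliteration: the for-loop over range(n_gpus) carrying (remainder, w_p_gpu), then .sort()
def get_windows_per_gpu (n_gpus : Int) (n_confs : Int) : List Int :=
  let round := PySem.Int.floordiv n_confs n_gpus
  let remainder := PySem.Int.mod n_confs n_gpus
  let st := (PySem.List.pyRange 0 n_gpus 1).foldl
    (fun (st : Int × List Int) (_i : Int) =>
      if st.1 ≠ 0 then (st.1 - 1, st.2 ++ [round + 1])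
      else (st.1, st.2 ++ [round]))
    (remainder, [])
  PySem.List.sorted st.2 (fun x => x) false

-- ===== PORT B =====
-- the comprehension [(n_confs + i) // n_gpus for i in range(n_gpus)]
def get_windows_per_gpu_alt (n_gpus : Int) (n_confs : Int) : List Int :=
  (PySem.List.pyRange 0 n_gpus 1).map (fun i => PySem.Int.floordiv (n_confs + i) n_gpus)

-- ===== PRECONDITION & SPEC =====
-- Pre_ excludes n_gpus = 0, on which A raises ZeroDivisionError
def Pre_get_windows_per_gpu (n_gpus : Int) (n_confs : Int) : Prop := n_gpus ≠ 0
instance (n_gpus : Int) (n_confs : Int) : Decidable (Pre_get_windows_per_gpu n_gpus n_confs) := by unfold Pre_get_windows_per_gpu; infer_instance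
def pvWitness_get_windows_per_gpu : Int × Int := (3, 7)
def Spec_get_windows_per_gpu (n_gpus : Int) (n_confs : Int) (out : List Int) : Prop := out = get_windows_per_gpu_alt n_gpus n_confs
instance (n_gpus : Int) (n_confs : Int) (out : List Int) : Decidable (Spec_get_windows_per_gpu n_gpus n_confs out) := by unfold Spec_get_windows_per_gpu; infer_instance

-- ===== CLAIM (what is proved, stated in full; the proofs are below) =====
def Claim_equal_get_windows_per_gpu : Prop := ∀ (n_gpus : Int) (n_confs : Int), Dom_get_windows_per_gpu n_gpus n_confs → Pre_get_windows_per_gpu n_gpus n_confs → Spec_get_windows_per_gpu n_gpus n_confs (get_windows_per_gpu n_gpus n_confs)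

-- ===== LEMMAS AND PROOFS =====

-- Python's % takes the sign of the divisor: bounds of PySem.Int.mod ( = Int.fmod )
theorem pv_mod_bounds (a b : Int) (hb : b ≠ 0) :
    (0 < b ∧ 0 ≤ PySem.Int.mod a b ∧ PySem.Int.mod a b < b) ∨
    (b < 0 ∧ b < PySem.Int.mod a b ∧ PySem.Int.mod a b ≤ 0) := by
  show (0 < b ∧ 0 ≤ a.fmod b ∧ a.fmod b < b) ∨ (b < 0 ∧ b < a.fmod b ∧ a.fmod b ≤ 0)
  have he : a.fmod b = a % b + if 0 ≤ b ∨ b ∣ a then 0 else b := Int.fmod_eq_emod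
  rcases lt_or_gt_of_ne hb with hneg | hpos
  · right
    refine ⟨hneg, ?_⟩
    by_cases hd : b ∣ a
    · simp [hd, hneg.not_ge] at he
      have h0 : a % b = 0 := Int.emod_eq_zero_of_dvd hd
      omega
    · have h1 : 0 ≤ a % b := Int.emod_nonneg a hb
      have h2 : a % b < -b := by
        have := Int.emod_lt_of_pos a (b := -b) (by omega)
        rwa [Int.emod_neg] at this
      simp [hneg.not_ge, hd] at he
      omega
  · left
    have h1 : 0 ≤ a % b := Int.emod_nonneg a hb
    have h2 : a % b < b := Int.emod_lt_of_pos a hpos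
    simp [hpos.le] at he
    omega

-- the division identity n_confs = g * q + r for PySem's floordiv/mod
theorem pv_div_identity (a b : Int) :
    PySem.Int.mod a b + b * PySem.Int.floordiv a b = a := by
  show a.fmod b + b * a.fdiv b = a
  exact Int.fmod_add_mul_fdiv a b

-- A's loop, run over any list of m elements with 0 ≤ r ≤ m, appends r copies of q+1
-- followed by m - r copies of q.
theorem pv_loop_eq (q : Int) (l : List Int) (r : Int) (acc : List Int)
    (h0 : 0 ≤ r) (hm : r ≤ l.length) :
    l.foldl
      (fun (st : Int × List Int) (_i : Int) =>
        if st.1 ≠ 0 then (st.1 - 1, st.2 ++ [q + 1])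
        else (st.1, st.2 ++ [q]))
      (r, acc)
    = (0, acc ++ List.replicate r.toNat (q + 1) ++ List.replicate (l.length - r.toNat) q) := by
  induction l generalizing r acc with
  | nil =>
    simp at hm
    simp [show r = 0 by omega]
  | cons x xs ih =>
    simp only [List.foldl_cons]
    by_cases hr : r = 0
    · subst hr
      simp only [ne_eq, not_true_eq_false, if_false]
      rw [ih 0 (acc ++ [q]) le_rfl (by simp)]
      simp [List.replicate_succ]
    · simp only [ne_eq, hr, not_false_eq_true, if_pos]
      rw [ih (r - 1) (acc ++ [q + 1]) (by omega) (by simp at hm ⊢; omega)]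
      have h1 : r.toNat = (r - 1).toNat + 1 := by omega
      have h2 : (x :: xs).length - r.toNat = xs.length - (r - 1).toNat := by
        simp [List.length_cons]; omega
      rw [h2, h1, List.replicate_succ]
      simp

theorem pv_pairwise_two_seg (a b : Nat) (q : Int) :
    (List.replicate a q ++ List.replicate b (q + 1)).Pairwise (fun x y => x ≤ y) := by
  apply List.pairwise_append.2
  refine ⟨List.pairwise_replicate.2 (by simp), List.pairwise_replicate.2 (by simp), ?_⟩
  intro x hx y hy
  rw [List.eq_of_mem_replicate hx, List.eq_of_mem_replicate hy]
  omega

-- B's per-index formula: with n_confs = g*q + r, 0 ≤ r < g and 0 ≤ j < g,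
-- (n_confs + j) fdiv g is q when r + j < g and q + 1 otherwise.
theorem pv_fdiv_shift (g q r j : Int) (hg : 0 < g) (hr0 : 0 ≤ r) (hrg : r < g)
    (hj0 : 0 ≤ j) (hjg : j < g) :
    PySem.Int.floordiv (g * q + r + j) g = if r + j < g then q else q + 1 := by
  show (g * q + r + j).fdiv g = _
  rw [Int.fdiv_eq_ediv, if_pos (Or.inl (by omega : (0:Int) ≤ g)), sub_zero]
  split_ifs with h
  · rw [show g * q + r + j = (r + j) + q * g by ring, Int.add_mul_ediv_right _ _ (by omega)]
    rw [Int.ediv_eq_zero_of_lt (by omega) h]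
    omega
  · rw [show g * q + r + j = (r + j - g) + (q + 1) * g by ring,
        Int.add_mul_ediv_right _ _ (by omega : g ≠ 0)]
    rw [Int.ediv_eq_zero_of_lt (by omega) (by omega)]
    omega

-- B's map over range(g) is the two-segment list
theorem pv_alt_two_seg (g c q r : Int) (hg : 0 < g) (hid : c = g * q + r)
    (hr0 : 0 ≤ r) (hrg : r < g) :
    (PySem.List.pyRange 0 g 1).map (fun i => PySem.Int.floordiv (c + i) g)
    = List.replicate (g.toNat - r.toNat) q ++ List.replicate r.toNat (q + 1) := by
  rw [PySem.List.pyRange_one]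
  apply List.ext_getElem
  · simp; omega
  · intro j hj1 hj2
    simp only [List.getElem_map, List.getElem_range, zero_add]
    rw [show c + (j : Int) = g * q + r + j by omega]
    rw [pv_fdiv_shift g q r j hg hr0 hrg (by positivity) (by simp at hj1; omega)]
    rcases Nat.lt_or_ge j (g.toNat - r.toNat) with h | h
    · rw [List.getElem_append_left (by simpa using h)]
      rw [List.getElem_replicate]
      rw [if_pos (by omega)]
    · rw [List.getElem_append_right (by simpa using h)]
      rw [List.getElem_replicate]
      simp at hj1
      rw [if_neg (by simp; omega)]

-- ===== VERDICT (by name: the statement is the Claim_ definition above) =====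
theorem get_windows_per_gpu_spec : Claim_equal_get_windows_per_gpu := by
  intro n_gpus n_confs _hdom hpre
  unfold Spec_get_windows_per_gpu get_windows_per_gpu get_windows_per_gpu_alt
  dsimp only
  set q := PySem.Int.floordiv n_confs n_gpus with hq
  set r := PySem.Int.mod n_confs n_gpus with hr
  have hb := pv_mod_bounds n_confs n_gpus hpre
  rw [← hr] at hb
  have hid := pv_div_identity n_confs n_gpus
  rw [← hr, ← hq] at hid
  rcases lt_or_ge n_gpus 0 with hneg | hpos
  · -- negative n_gpus: range is empty on both sides
    have hrange : PySem.List.pyRange 0 n_gpus 1 = [] := by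
      rw [PySem.List.pyRange_one]; simp; omega
    simp only [hrange, List.foldl_nil, List.map_nil]
    exact (PySem.List.sorted_eq_nil_iff _ _ _).2 rfl
  · -- positive n_gpus: A's loop makes r copies of q+1 then g-r of q; sorting gives the two segments
    have hgt : 0 < n_gpus := lt_of_le_of_ne hpos (Ne.symm hpre)
    have hrb : 0 ≤ r ∧ r < n_gpus := by omega
    have hlen : (PySem.List.pyRange 0 n_gpus 1).length = n_gpus.toNat := by
      rw [PySem.List.length_pyRange_one]; omega
    rw [pv_loop_eq q _ r [] hrb.1 (by rw [hlen]; omega)]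
    simp only [List.nil_append, hlen]
    rw [pv_alt_two_seg n_gpus n_confs q r hgt (by omega) hrb.1 hrb.2]
    apply PySem.List.sorted_id_eq_of_perm_of_pairwise
    · rw [show n_gpus.toNat - r.toNat = (n_gpus - r).toNat by omega] at *
      exact List.perm_append_comm
    · exact pv_pairwise_two_seg _ _ q
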